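-- pv_equiv track=rewrite | github.com/yjc9426/ece364 | Prelab03/basicOps.py | getSequenceWithoutDigit
-- ===== SOURCE A (Python) =====
-- def getSequenceWithoutDigit(num):
--     strList = ["736925233695599303035509581762617623184956190649483967300203776387436934399982",
--
-- "943020914707361894793269276244518656023955905370512897816345542332011497599489",
--
-- "627842432748378803270141867695262118097500640514975588965029300486760520801049",
--
-- "153788541390942453169171998762894127722112946456829486028149318156024967788794",
--
-- "981377721622935943781100444806079767242927624951078415344642915084276452000204",
--
-- "276947069804177583220909702029165734725158290463091035903784297757265172087724",
--
-- "474095226716630600546971638794317119687348468873818665675127929857501636341131"]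
--
--     convertStr = ''.join(strList)
--     startIndex = 0
--     endIndex = 0
--     n = 0
--     longStr=""
--     while n < len(convertStr):
--         if str(num) == convertStr[0] and n == 0:
--             startIndex = 1
--         elif str(num) == convertStr[n]:
--             if endIndex == 0 and startIndex != 1:
--                 startIndex = endIndex
--                 endIndex = n
--             else:
--                 startIndex = endIndex+1
--                 endIndex = n
--
--         temp = convertStr[startIndex:endIndex]
--
--         if len(temp) > len(longStr):
--             longStr = convertStr[startIndex:endIndex]
--         n += 1
--     return longStr
-- ===== SOURCE B (Python) =====
-- def getSequenceWithoutDigit(num):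
--     strList = ["736925233695599303035509581762617623184956190649483967300203776387436934399982",
--
-- "943020914707361894793269276244518656023955905370512897816345542332011497599489",
--
-- "627842432748378803270141867695262118097500640514975588965029300486760520801049",
--
-- "153788541390942453169171998762894127722112946456829486028149318156024967788794",
--
-- "981377721622935943781100444806079767242927624951078415344642915084276452000204",
--
-- "276947069804177583220909702029165734725158290463091035903784297757265172087724",
--
-- "474095226716630600546971638794317119687348468873818665675127929857501636341131"]
--     convertStr = ''.join(strList)
--     s = str(num)
--     positions = [i for i, c in enumerate(convertStr) if c == s]
--     best = ""
--     start = 0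
--     for k, p in enumerate(positions):
--         if k == 0 and p == 0:
--             start = 1
--             continue
--         seg = convertStr[start:p]
--         if len(seg) > len(best):
--             best = seg
--         start = p + 1
--     return best
-- ===== Notes on version B (the rewrite author's own statement) =====
-- stated objective: simpler
-- what changed: A walks every index of the 546-char constant, re-deriving start/end slice bounds from three interacting state variables and re-slicing on every iteration; B first collects the positions where str(num) matches a character, then folds once over those positions, slicing each gap between consecutive matches exactly once.
import Mathlib
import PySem

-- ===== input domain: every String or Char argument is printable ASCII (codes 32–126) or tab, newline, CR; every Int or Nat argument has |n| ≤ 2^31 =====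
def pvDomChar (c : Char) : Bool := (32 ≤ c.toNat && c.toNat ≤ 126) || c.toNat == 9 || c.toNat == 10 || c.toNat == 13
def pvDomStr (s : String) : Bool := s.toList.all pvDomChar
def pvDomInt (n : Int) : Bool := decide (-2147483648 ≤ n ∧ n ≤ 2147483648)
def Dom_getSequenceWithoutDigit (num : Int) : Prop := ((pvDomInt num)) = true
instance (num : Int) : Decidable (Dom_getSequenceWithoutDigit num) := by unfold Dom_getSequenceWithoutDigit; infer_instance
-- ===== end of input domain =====

-- B replaces A's per-index while-loop with stateful slice bookkeeping by a two-phase scan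
-- (collect the match positions, then fold over the gaps between them); objective: simpler.


-- ===== PORT A =====
def pvStrList : List String :=
  ["736925233695599303035509581762617623184956190649483967300203776387436934399982",
   "943020914707361894793269276244518656023955905370512897816345542332011497599489",
   "627842432748378803270141867695262118097500640514975588965029300486760520801049",
   "153788541390942453169171998762894127722112946456829486028149318156024967788794",
   "981377721622935943781100444806079767242927624951078415344642915084276452000204",
   "276947069804177583220909702029165734725158290463091035903784297757265172087724",
   "474095226716630600546971638794317119687348468873818665675127929857501636341131"]

-- the (startIndex, endIndex) update of one iteration of A's while-loop; nc = (n, convertStr[n])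
-- (A's guard 'str(num) == convertStr[0] and n == 0' is equivalent to comparing with convertStr[n],
--  since the guard can only hold at n == 0, where convertStr[0] is convertStr[n])
def pvSE (s : String) (st : Int × Int × String) (nc : Int × Char) : Int × Int :=
  if s = String.singleton nc.2 ∧ nc.1 = 0 then (1, st.2.1)
  else if s = String.singleton nc.2 then
    if st.2.1 = 0 ∧ st.1 ≠ 1 then (st.2.1, nc.1)
    else (st.2.1 + 1, nc.1)
  else (st.1, st.2.1)

-- one full iteration of A's while-loop body (index update, temp slice, longStr update)
def pvStepA (s : String) (convertStr : String) (st : Int × Int × String) (nc : Int × Char) :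
    Int × Int × String :=
  ((pvSE s st nc).1, (pvSE s st nc).2,
    if PySem.Str.len (PySem.Str.slice convertStr (some (pvSE s st nc).1) (some (pvSE s st nc).2)) >
        PySem.Str.len st.2.2
    then PySem.Str.slice convertStr (some (pvSE s st nc).1) (some (pvSE s st nc).2)
    else st.2.2)

-- A's while-loop over n = 0 .. len(convertStr)-1, carrying (startIndex, endIndex, longStr);
-- at the end A returns longStr
def pvLoopA (s : String) (convertStr : String) (st : Int × Int × String) :
    List (Int × Char) → String
  | [] => st.2.2
  | x :: l => pvLoopA s convertStr (pvStepA s convertStr st x) l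

def getSequenceWithoutDigit (num : Int) : String :=
  pvLoopA (PySem.Int.toStr num) (PySem.Str.join "" pvStrList) (0, 0, "")
    (PySem.List.enumerate (PySem.Str.join "" pvStrList).toList)

-- ===== PORT B =====
-- one iteration of B's for-loop over the enumerated match positions; kp = (k, p)
def pvStepB (convertStr : String) (st : String × Int) (kp : Int × Int) : String × Int :=
  if kp.1 = 0 ∧ kp.2 = 0 then (st.1, 1)
  else
    (if PySem.Str.len (PySem.Str.slice convertStr (some st.2) (some kp.2)) >
        PySem.Str.len st.1
     then PySem.Str.slice convertStr (some st.2) (some kp.2)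
     else st.1, kp.2 + 1)

-- B's for-loop over enumerate(positions), carrying (best, start); at the end B returns best
def pvLoopB (convertStr : String) (st : String × Int) : List (Int × Int) → String
  | [] => st.1
  | x :: l => pvLoopB convertStr (pvStepB convertStr st x) l

def getSequenceWithoutDigit_alt (num : Int) : String :=
  pvLoopB (PySem.Str.join "" pvStrList) ("", 0)
    (PySem.List.enumerate
      (((PySem.List.enumerate (PySem.Str.join "" pvStrList).toList).filter
        (fun ic => PySem.Int.toStr num == String.singleton ic.2)).map (·.1)))

-- ===== PRECONDITION & SPEC =====
def Spec_getSequenceWithoutDigit (num : Int) (out : String) : Prop := out = getSequenceWithoutDigit_alt num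
instance (num : Int) (out : String) : Decidable (Spec_getSequenceWithoutDigit num out) := by unfold Spec_getSequenceWithoutDigit; infer_instance

-- ===== CLAIM (what is proved, stated in full; the proofs are below) =====
def Claim_equal_getSequenceWithoutDigit : Prop := ∀ (num : Int), Dom_getSequenceWithoutDigit num → Spec_getSequenceWithoutDigit num (getSequenceWithoutDigit num)

-- ===== LEMMAS AND PROOFS =====

-- a state of A's loop is stable when its recorded longest string already accounts for
-- the slice its current (startIndex, endIndex) pair denotes
def pvStable (C : String) (st : Int × Int × String) : Prop :=
  PySem.Str.len (PySem.Str.slice C (some st.1) (some st.2.1)) ≤ PySem.Str.len st.2.2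

lemma pvLen_slice (C : String) (a b : Int) :
    PySem.Str.len (PySem.Str.slice C (some a) (some b)) =
      ((PySem.List.clampIdx C.toList.length b - PySem.List.clampIdx C.toList.length a : Nat) : Int) := by
  simp [PySem.Str.len, PySem.Str.slice, PySem.Chars.slice, PySem.List.length_slice]

lemma pvStable_step (s C : String) (st : Int × Int × String) (x : Int × Char) :
    pvStable C (pvStepA s C st x) := by
  by_cases h : PySem.Str.len (PySem.Str.slice C (some (pvSE s st x).1) (some (pvSE s st x).2)) >
      PySem.Str.len st.2.2
  · simp only [pvStable, pvStepA, if_pos h]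
    exact le_refl _
  · simp only [pvStable, pvStepA, if_neg h]
    exact not_lt.mp h

lemma pvStepA_id (s C : String) (st : Int × Int × String) (x : Int × Char)
    (hx : ¬ s = String.singleton x.2) (hst : pvStable C st) :
    pvStepA s C st x = st := by
  obtain ⟨a, e, L⟩ := st
  have hse : pvSE s (a, e, L) x = (a, e) := by
    simp only [pvSE]
    rw [if_neg (by tauto), if_neg hx]
  unfold pvStable at hst
  simp only [pvStepA, hse] at *
  rw [if_neg (not_lt.mpr hst)]

lemma pvLoopA_filter (s C : String) (l : List (Int × Char)) (st : Int × Int × String)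
    (hst : pvStable C st) :
    pvLoopA s C st l = pvLoopA s C st (l.filter (fun ic => s == String.singleton ic.2)) := by
  induction l generalizing st with
  | nil => rfl
  | cons x tl ih =>
    rw [List.filter_cons]
    by_cases h : s = String.singleton x.2
    · rw [if_pos (by simp [h])]
      simp only [pvLoopA]
      exact ih _ (pvStable_step s C st x)
    · rw [if_neg (by simp [h])]
      simp only [pvLoopA]
      rw [pvStepA_id s C st x h hst]
      exact ih _ hst

lemma pvStable_init (C : String) : pvStable C (0, 0, "") := by
  unfold pvStable
  rw [pvLen_slice]
  have h0 : PySem.List.clampIdx C.toList.length 0 = 0 := by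
    simpa using PySem.List.clampIdx_natCast C.toList.length 0
  rw [h0]
  simp [PySem.Str.len]

lemma pvEnum_le {α : Type} (xs : List α) (k : Int) :
    ∀ y ∈ PySem.List.enumerate xs k, k ≤ y.1 := by
  induction xs generalizing k with
  | nil => simp [PySem.List.enumerate]
  | cons x tl ih =>
    intro y hy
    simp only [PySem.List.enumerate, List.mem_cons] at hy
    rcases hy with rfl | hy
    · exact le_refl _
    · exact le_trans (by omega) (ih (k + 1) y hy)

lemma pvEnum_lt {α : Type} (xs : List α) (k : Int) :
    (PySem.List.enumerate xs k).Pairwise (fun x y => x.1 < y.1) := by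
  induction xs generalizing k with
  | nil => simp [PySem.List.enumerate]
  | cons x tl ih =>
    simp only [PySem.List.enumerate]
    exact List.Pairwise.cons (fun y hy => lt_of_lt_of_le (by omega) (pvEnum_le tl (k + 1) y hy))
      (ih (k + 1))

lemma pvTail (s C : String) (l : List (Int × Char))
    (hm : ∀ x ∈ l, s = String.singleton x.2)
    (hp : ∀ x ∈ l, x.1 ≠ 0)
    (a e : Int) (L : String) (hae : e ≠ 0 ∨ a = 1) (k : Int) (hk : 1 ≤ k) :
    pvLoopA s C (a, e, L) l =
      pvLoopB C (L, e + 1) (PySem.List.enumerate (l.map (·.1)) k) := by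
  induction l generalizing a e L k with
  | nil => simp [pvLoopA, pvLoopB, PySem.List.enumerate]
  | cons x tl ih =>
    obtain ⟨n, c⟩ := x
    have hn : n ≠ 0 := hp (n, c) (List.mem_cons_self ..)
    have hsc : s = String.singleton c := hm (n, c) (List.mem_cons_self ..)
    have hstep : pvStepA s C (a, e, L) (n, c) =
        (e + 1, n, if PySem.Str.len (PySem.Str.slice C (some (e + 1)) (some n)) > PySem.Str.len L
          then PySem.Str.slice C (some (e + 1)) (some n) else L) := by
      have hse : pvSE s (a, e, L) (n, c) = (e + 1, n) := by
        simp only [pvSE]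
        rw [if_neg (by simp [hn]), if_pos hsc, if_neg (by tauto)]
      simp only [pvStepA, hse]
    have hstepB : pvStepB C (L, e + 1) (k, n) =
        ((if PySem.Str.len (PySem.Str.slice C (some (e + 1)) (some n)) > PySem.Str.len L
          then PySem.Str.slice C (some (e + 1)) (some n) else L), n + 1) := by
      simp only [pvStepB]
      rw [if_neg (by omega)]
    simp only [List.map_cons, PySem.List.enumerate, pvLoopA, pvLoopB, hstep, hstepB]
    exact ih (fun y hy => hm y (List.mem_cons_of_mem _ hy))
      (fun y hy => hp y (List.mem_cons_of_mem _ hy)) (e + 1) n _ (Or.inl hn) (k + 1) (by omega)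

lemma pvMain (s C : String) :
    pvLoopA s C (0, 0, "") (PySem.List.enumerate C.toList) =
      pvLoopB C ("", 0)
        (PySem.List.enumerate
          (((PySem.List.enumerate C.toList).filter
            (fun ic => s == String.singleton ic.2)).map (·.1))) := by
  rw [pvLoopA_filter s C _ _ (pvStable_init C)]
  have hm : ∀ x ∈ (PySem.List.enumerate C.toList).filter
      (fun ic => s == String.singleton ic.2), s = String.singleton x.2 := by
    intro x hx
    have := List.of_mem_filter hx
    simpa using this
  have hmono : ((PySem.List.enumerate C.toList).filter
      (fun ic => s == String.singleton ic.2)).Pairwise (fun x y => x.1 < y.1) :=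
    List.Pairwise.filter _ (pvEnum_lt C.toList 0)
  have hnn : ∀ x ∈ (PySem.List.enumerate C.toList).filter
      (fun ic => s == String.singleton ic.2), 0 ≤ x.1 := by
    intro x hx
    exact pvEnum_le C.toList 0 x (List.mem_of_mem_filter hx)
  cases hfl : (PySem.List.enumerate C.toList).filter
      (fun ic => s == String.singleton ic.2) with
  | nil => simp [pvLoopA, pvLoopB, PySem.List.enumerate]
  | cons x tl =>
    obtain ⟨p, c⟩ := x
    rw [hfl] at hm hmono hnn
    have hsc : s = String.singleton c := hm (p, c) (List.mem_cons_self ..)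
    have hptl : ∀ y ∈ tl, p < y.1 := by
      intro y hy
      exact (List.pairwise_cons.mp hmono).1 y hy
    have hp0 : (0 : Int) ≤ p := hnn (p, c) (List.mem_cons_self ..)
    by_cases hp : p = 0
    · subst hp
      have hstep : pvStepA s C (0, 0, "") ((0 : Int), c) = (1, 0, "") := by
        have hse : pvSE s ((0 : Int), (0 : Int), "") ((0 : Int), c) = (1, 0) := by
          simp only [pvSE]
          rw [if_pos (by simp [hsc])]
        have h0 : PySem.Str.len (PySem.Str.slice C (some 1) (some 0)) ≤ PySem.Str.len "" := by
          rw [pvLen_slice]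
          have h1 : PySem.List.clampIdx C.toList.length 0 = 0 := by
            simpa using PySem.List.clampIdx_natCast C.toList.length 0
          rw [h1]
          simp [PySem.Str.len]
        simp only [pvStepA, hse]
        rw [if_neg (not_lt.mpr h0)]
      have hstepB : pvStepB C ("", 0) ((0 : Int), (0 : Int)) = ("", 1) := by
        simp [pvStepB]
      simp only [List.map_cons, PySem.List.enumerate, pvLoopA, pvLoopB, hstep, hstepB]
      exact pvTail s C tl (fun y hy => hm y (List.mem_cons_of_mem _ hy))
        (fun y hy => by have := hptl y hy; omega) 1 0 "" (Or.inr rfl) 1 le_rfl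
    · have hstep : pvStepA s C (0, 0, "") (p, c) =
          (0, p, if PySem.Str.len (PySem.Str.slice C (some 0) (some p)) > PySem.Str.len ""
            then PySem.Str.slice C (some 0) (some p) else "") := by
        have hse : pvSE s ((0 : Int), (0 : Int), "") (p, c) = (0, p) := by
          simp only [pvSE]
          rw [if_neg (by tauto), if_pos hsc, if_pos (by simp)]
        simp only [pvStepA, hse]
      have hstepB : pvStepB C ("", 0) ((0 : Int), p) =
          ((if PySem.Str.len (PySem.Str.slice C (some 0) (some p)) > PySem.Str.len ""
            then PySem.Str.slice C (some 0) (some p) else ""), p + 1) := by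
        simp only [pvStepB]
        rw [if_neg (by simp [hp])]
      simp only [List.map_cons, PySem.List.enumerate, pvLoopA, pvLoopB, hstep, hstepB]
      exact pvTail s C tl (fun y hy => hm y (List.mem_cons_of_mem _ hy))
        (fun y hy => by have := hptl y hy; omega) 0 p _ (Or.inl hp) 1 le_rfl

-- ===== VERDICT (by name: the statement is the Claim_ definition above) =====
theorem getSequenceWithoutDigit_spec : Claim_equal_getSequenceWithoutDigit := by
  intro num _
  show getSequenceWithoutDigit num = getSequenceWithoutDigit_alt num
  exact pvMain (PySem.Int.toStr num) (PySem.Str.join "" pvStrList)
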